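-- pv_equiv track=rewrite | github.com/s12121296/riscv-isac | riscv_isac/coverage.py | gen_report
-- ===== SOURCE A (Python) =====
-- def gen_report(cgf, detailed):
--     rpt_str = ''
--     for cov_labels, value in cgf.items():
--         if cov_labels != 'datasets':
--             rpt_str += cov_labels + ':\n'
--             total_uncovered = 0
--             total_categories = 0
--             for categories in value:
--                 if categories != 'config' and categories != 'opcode':
--                     for coverpoints, coverage in value[categories].items():
--                         if coverage == 0:
--                             total_uncovered += 1
--                     total_categories += len(value[categories])
--             rpt_str += '  coverage: '+str(total_categories -total_uncovered) + \
--                     '/' + str(total_categories)+'\n'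
--             for categories in value:
--                 if categories != 'config' and categories != 'opcode':
--                     uncovered = 0
--                     for coverpoints, coverage in value[categories].items():
--                         if coverage == 0:
--                             uncovered += 1
--                     percentage_covered = str((len(value[categories]) - uncovered)/len(value[categories]))
--                     node_level_str =  '  ' + categories + ':\n'
--                     node_level_str += '    coverage: ' + \
--                             str(len(value[categories]) - uncovered) + \
--                             '/' + str(len(value[categories]))
--                     rpt_str += node_level_str + '\n'
--                     if detailed:
--                         rpt_str += '    detail:\n'
--                         for coverpoints in value[categories]:
--                             rpt_str += '      - '+str(coverpoints) + ': ' + str(value[categories][coverpoints]) + '\n'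
--     return rpt_str
-- ===== SOURCE B (Python) =====
-- def gen_report(cgf, detailed):
--     lines = []
--     for label, value in cgf.items():
--         if label == 'datasets':
--             continue
--         lines.append(label + ':')
--         rows = []
--         total_covered = 0
--         total = 0
--         for cat, cps in value.items():
--             if cat == 'config' or cat == 'opcode':
--                 continue
--             n = len(cps)
--             covered = sum(1 for v in cps.values() if v != 0)
--             total_covered += covered
--             total += n
--             rows.append((cat, covered, n, cps))
--         lines.append('  coverage: %d/%d' % (total_covered, total))
--         for cat, covered, n, cps in rows:
--             lines.append('  ' + cat + ':')
--             lines.append('    coverage: %d/%d' % (covered, n))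
--             if detailed:
--                 lines.append('    detail:')
--                 for k, v in cps.items():
--                     lines.append('      - %s: %s' % (k, v))
--     return '\n'.join(lines) + '\n' if lines else ''
-- ===== Notes on version B (the rewrite author's own statement) =====
-- stated objective: alternative
-- what changed: B makes a single pass over each label's categories collecting (category, covered, total, coverpoints) rows and running grand totals, counts covered coverpoints directly instead of subtracting an uncovered count, builds the report as a list of lines joined once at the end instead of repeated string concatenation, and has no dead per-category percentage division.
import Mathlib
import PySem

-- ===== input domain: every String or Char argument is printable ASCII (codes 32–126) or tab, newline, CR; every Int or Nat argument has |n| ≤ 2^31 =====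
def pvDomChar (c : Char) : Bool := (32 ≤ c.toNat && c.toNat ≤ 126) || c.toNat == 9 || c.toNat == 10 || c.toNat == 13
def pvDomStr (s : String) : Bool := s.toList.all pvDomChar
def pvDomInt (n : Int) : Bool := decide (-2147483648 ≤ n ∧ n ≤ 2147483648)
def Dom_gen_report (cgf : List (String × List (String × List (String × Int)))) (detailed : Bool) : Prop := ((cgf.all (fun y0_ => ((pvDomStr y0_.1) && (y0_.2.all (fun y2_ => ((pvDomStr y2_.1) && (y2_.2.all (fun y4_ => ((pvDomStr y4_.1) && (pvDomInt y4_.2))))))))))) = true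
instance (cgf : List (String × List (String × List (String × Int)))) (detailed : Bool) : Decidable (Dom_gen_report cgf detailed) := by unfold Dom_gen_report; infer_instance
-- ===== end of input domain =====

-- B rebuilds the report in one pass per label (collecting rows + running totals, then joining
-- lines) instead of A's two scans per label; equivalence is proved on the return value only.

-- ===== PORT A =====
-- 'for coverpoints, coverage in value[categories].items(): if coverage == 0: total_uncovered += 1'
def uncovA (cps : List (String × Int)) : Int :=
  cps.foldl (fun u kv => if kv.2 == 0 then u + 1 else u) 0

def gen_report (cgf : List (String × List (String × List (String × Int)))) (detailed : Bool) : String :=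
  cgf.foldl (fun rpt_str lv =>
    if lv.1 != "datasets" then
      let value := lv.2
      let r1 := rpt_str ++ lv.1 ++ ":\n"
      -- first pass: totals
      let tp : Int × Int := (value.map Prod.fst).foldl (fun acc k =>
          if k != "config" && k != "opcode" then
            let cps := (PySem.Dict.mk value).getD k []
            (acc.1 + uncovA cps, acc.2 + (cps.length : Int))
          else acc) (0, 0)
      let r2 := r1 ++ "  coverage: " ++ PySem.Int.toStr (tp.2 - tp.1) ++ "/" ++ PySem.Int.toStr tp.2 ++ "\n"
      -- second pass: per-category nodes
      (value.map Prod.fst).foldl (fun r k =>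
        if k != "config" && k != "opcode" then
          let cps := (PySem.Dict.mk value).getD k []
          let uncovered := uncovA cps
          -- NOTE: A's dead 'percentage_covered = str((len-uncovered)/len(...))' float is not
          -- ported: its only observable effect is a ZeroDivisionError on an empty category
          -- dict, and exactly those inputs are excluded by Pre_gen_report.
          let node := "  " ++ k ++ ":\n" ++ "    coverage: " ++
                      PySem.Int.toStr ((cps.length : Int) - uncovered) ++ "/" ++
                      PySem.Int.toStr ((cps.length : Int))
          let r' := r ++ node ++ "\n"
          if detailed then
            (cps.map Prod.fst).foldl
              (fun r'' ck => r'' ++ "      - " ++ ck ++ ": " ++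
                             PySem.Int.toStr ((PySem.Dict.mk cps).getD ck 0) ++ "\n")
              (r' ++ "    detail:\n")
          else r'
        else r) r2
    else rpt_str) ""

-- ===== PORT B =====
-- 'covered = sum(1 for v in cps.values() if v != 0)'
def covB (cps : List (String × Int)) : Int :=
  (((cps.map Prod.snd).filter (fun v => v != 0)).map (fun _ => (1 : Int))).sum

def gen_report_alt (cgf : List (String × List (String × List (String × Int)))) (detailed : Bool) : String :=
  let lines := cgf.foldl (fun (lines : List String) lv =>
    if lv.1 == "datasets" then lines else
    let lines := lines ++ [lv.1 ++ ":"]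
    -- single pass: rows + running totals
    let rt := lv.2.foldl
      (fun (acc : List (String × Int × Int × List (String × Int)) × Int × Int) cv =>
        if cv.1 == "config" || cv.1 == "opcode" then acc
        else
          let n : Int := (cv.2.length : Int)
          let covered := covB cv.2
          (acc.1 ++ [(cv.1, covered, n, cv.2)], acc.2.1 + covered, acc.2.2 + n))
      ([], 0, 0)
    let lines := lines ++ ["  coverage: " ++ PySem.Int.toStr rt.2.1 ++ "/" ++ PySem.Int.toStr rt.2.2]
    rt.1.foldl (fun ls row =>
      let ls := ls ++ ["  " ++ row.1 ++ ":"] ++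
                ["    coverage: " ++ PySem.Int.toStr row.2.1 ++ "/" ++ PySem.Int.toStr row.2.2.1]
      if detailed then
        ls ++ ["    detail:"] ++
          row.2.2.2.map (fun kv => "      - " ++ kv.1 ++ ": " ++ PySem.Int.toStr kv.2)
      else ls) lines) ([] : List String)
  if lines.isEmpty then "" else PySem.Str.join "\n" lines ++ "\n"

-- ===== PRECONDITION & SPEC =====
-- Pre_ excludes (i) inputs where some non-skipped category dict is empty: there A raises
-- ZeroDivisionError in its dead percentage computation; and (ii) association lists with
-- duplicate keys, where the list representation's first-match lookup cannot reflect a real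
-- Python dict (which silently keeps only the last binding per key).
def Pre_gen_report (cgf : List (String × List (String × List (String × Int)))) (detailed : Bool) : Prop :=
  (cgf.map Prod.fst).Nodup ∧
  ∀ lv ∈ cgf, lv.1 ≠ "datasets" →
    (lv.2.map Prod.fst).Nodup ∧
    ∀ cv ∈ lv.2, cv.1 ≠ "config" → cv.1 ≠ "opcode" →
      cv.2 ≠ [] ∧ (cv.2.map Prod.fst).Nodup
instance (cgf : List (String × List (String × List (String × Int)))) (detailed : Bool) : Decidable (Pre_gen_report cgf detailed) := by unfold Pre_gen_report; infer_instance

def pvWitness_gen_report : (List (String × List (String × List (String × Int)))) × Bool :=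
  ([("rv32i", [("config", []), ("cat1", [("cp1", 1), ("cp2", 0)])])], true)

def Spec_gen_report (cgf : List (String × List (String × List (String × Int)))) (detailed : Bool) (out : String) : Prop := out = gen_report_alt cgf detailed
instance (cgf : List (String × List (String × List (String × Int)))) (detailed : Bool) (out : String) : Decidable (Spec_gen_report cgf detailed out) := by unfold Spec_gen_report; infer_instance

-- ===== CLAIM (what is proved, stated in full; the proofs are below) =====
def Claim_equal_gen_report : Prop := ∀ (cgf : List (String × List (String × List (String × Int)))) (detailed : Bool), Dom_gen_report cgf detailed → Pre_gen_report cgf detailed → Spec_gen_report cgf detailed (gen_report cgf detailed)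

-- ===== LEMMAS AND PROOFS =====

-- strings are equal when their character lists are
theorem str_ext {a b : String} (h : a.toList = b.toList) : a = b := by
  have h2 := congrArg String.ofList h
  simpa using h2

theorem join_foldl_aux : ∀ (l : List String) (s : String),
    (l.foldl (· ++ ·) s).toList = s.toList ++ (l.map String.toList).flatten := by
  intro l
  induction l with
  | nil => intro s; simp
  | cons a t ih => intro s; simp [List.foldl_cons, ih (s ++ a)]

theorem toList_join (l : List String) :
    (String.join l).toList = (l.map String.toList).flatten := by
  simpa [String.join] using join_foldl_aux l ""

theorem join_cons (a : String) (t : List String) :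
    String.join (a :: t) = a ++ String.join t := by
  apply str_ext; simp [toList_join]

theorem join_append (a b : List String) :
    String.join (a ++ b) = String.join a ++ String.join b := by
  apply str_ext; simp [toList_join]

-- append each line's newline and concatenate
def SJ (ls : List String) : String := String.join (ls.map (· ++ "\n"))

theorem SJ_append (a b : List String) : SJ (a ++ b) = SJ a ++ SJ b := by
  simp [SJ, join_append]

theorem SJ_nil : SJ [] = "" := rfl

theorem chars_join_nl : ∀ (cls : List (List Char)), cls ≠ [] →
    PySem.Chars.join ['\n'] cls ++ ['\n'] = (cls.map (fun c => c ++ ['\n'])).flatten := by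
  intro cls
  induction cls with
  | nil => intro h; exact absurd rfl h
  | cons a t ih =>
    intro _
    cases t with
    | nil => simp [PySem.Chars.join_singleton]
    | cons b u =>
      rw [PySem.Chars.join_cons_cons]
      have h2 := ih (by simp)
      simp only [List.map_cons, List.flatten_cons] at h2 ⊢
      rw [← h2]; simp

theorem join_newline (ls : List String) (h : ls ≠ []) :
    PySem.Str.join "\n" ls ++ "\n" = SJ ls := by
  apply str_ext
  have hmap : (ls.map String.toList) ≠ [] := by simpa using h
  have hc := chars_join_nl (ls.map String.toList) hmap
  simp only [SJ, toList_join, List.map_map]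
  simp only [String.toList_append] at *
  calc (PySem.Str.join "\n" ls).toList ++ ("\n" : String).toList
      = PySem.Chars.join ['\n'] (ls.map String.toList) ++ ['\n'] := by
        simp [PySem.Str.toList_join]
    _ = ((ls.map String.toList).map (fun c => c ++ ['\n'])).flatten := hc
    _ = (ls.map (fun s => (String.toList ∘ fun x => x ++ "\n") s)).flatten := by
        simp [Function.comp_def]

-- covered + uncovered = total
theorem uncovA_shift : ∀ (l : List (String × Int)) (u : Int),
    l.foldl (fun u kv => if kv.2 == 0 then u + 1 else u) u = u + uncovA l := by
  intro l
  induction l with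
  | nil => intro u; simp [uncovA]
  | cons x xs ihx =>
    intro u
    simp only [uncovA, List.foldl_cons]
    rw [ihx, ihx (if x.2 == 0 then 0 + 1 else 0)]
    split <;> ring

theorem uncovA_cons (kv : String × Int) (t : List (String × Int)) :
    uncovA (kv :: t) = (if kv.2 == 0 then 1 else 0) + uncovA t := by
  simp only [uncovA, List.foldl_cons]
  rw [uncovA_shift]
  split <;> simp [uncovA]

theorem covB_cons (kv : String × Int) (t : List (String × Int)) :
    covB (kv :: t) = (if kv.2 == 0 then 0 else 1) + covB t := by
  simp only [covB, List.map_cons, List.filter_cons]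
  by_cases h : kv.2 = 0
  · simp [h]
  · have hb : (kv.2 != 0) = true := by simpa using h
    have hb2 : (kv.2 == 0) = false := by simpa using h
    simp [hb, hb2]

theorem uncov_add_cov (cps : List (String × Int)) :
    uncovA cps + covB cps = (cps.length : Int) := by
  induction cps with
  | nil => simp [uncovA, covB]
  | cons kv t ih =>
    rw [uncovA_cons, covB_cons]
    simp only [List.length_cons]
    push_cast
    by_cases h : kv.2 = 0 <;> simp [h] <;> omega

-- canonical per-category guard: 'categories != config and categories != opcode'
def Qc (cv : String × List (String × Int)) : Bool := cv.1 != "config" && cv.1 != "opcode"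

def dline (kv : String × Int) : String := "      - " ++ kv.1 ++ ": " ++ PySem.Int.toStr kv.2

def rowF (cv : String × List (String × Int)) : String × Int × Int × List (String × Int) :=
  (cv.1, covB cv.2, (cv.2.length : Int), cv.2)

def rowLines (detailed : Bool) (row : String × Int × Int × List (String × Int)) : List String :=
  ["  " ++ row.1 ++ ":", "    coverage: " ++ PySem.Int.toStr row.2.1 ++ "/" ++ PySem.Int.toStr row.2.2.1] ++
  (if detailed then "    detail:" :: row.2.2.2.map dline else [])

def catA (detailed : Bool) (cv : String × List (String × Int)) : String :=
  "  " ++ cv.1 ++ ":\n" ++ "    coverage: " ++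
    PySem.Int.toStr ((cv.2.length : Int) - uncovA cv.2) ++ "/" ++
    PySem.Int.toStr ((cv.2.length : Int)) ++ "\n" ++
  (if detailed then "    detail:\n" ++ String.join (cv.2.map (fun kv => dline kv ++ "\n")) else "")

-- string-accumulator loop shape: every step appends
theorem foldl_strcat {α : Type} (g : α → String) : ∀ (l : List α) (s : String),
    l.foldl (fun acc x => acc ++ g x) s = s ++ String.join (l.map g) := by
  intro l
  induction l with
  | nil => intro s; apply str_ext; simp
  | cons a t ih =>
    intro s
    simp only [List.foldl_cons, List.map_cons, join_cons]
    rw [ih (s ++ g a)]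
    apply str_ext; simp

theorem join_ite (g : α → String) (p : α → Bool) : ∀ (l : List α),
    String.join (l.map (fun x => if p x then g x else "")) = String.join ((l.filter p).map g) := by
  intro l
  induction l with
  | nil => rfl
  | cons a t ih =>
    by_cases h : p a
    · simp only [List.map_cons, List.filter_cons, h, if_pos, join_cons, ih]
    · have hf : p a = false := by simpa using h
      simp only [List.map_cons, List.filter_cons, hf, join_cons, ih]
      apply str_ext; simp

-- B's single pass: rows plus running totals
theorem B_pass (detailed : Bool) : ∀ (value : List (String × List (String × Int)))
    (R : List (String × Int × Int × List (String × Int))) (C T : Int),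
    value.foldl
      (fun (acc : List (String × Int × Int × List (String × Int)) × Int × Int) cv =>
        if cv.1 == "config" || cv.1 == "opcode" then acc
        else
          let n : Int := (cv.2.length : Int)
          let covered := covB cv.2
          (acc.1 ++ [(cv.1, covered, n, cv.2)], acc.2.1 + covered, acc.2.2 + n)) (R, C, T)
      = (R ++ (value.filter Qc).map rowF,
         C + ((value.filter Qc).map (fun cv => covB cv.2)).sum,
         T + ((value.filter Qc).map (fun cv => (cv.2.length : Int))).sum) := by
  intro value
  induction value with
  | nil => intro R C T; simp
  | cons cv t ih =>
    intro R C T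
    by_cases h : (cv.1 == "config" || cv.1 == "opcode") = true
    · have hq : Qc cv = false := by
        simp only [Qc, bne]; rcases Bool.or_eq_true_iff.mp h with h1 | h1 <;> simp [h1]
      simp only [List.foldl_cons, h, if_pos, List.filter_cons, hq]
      exact ih R C T
    · have hq : Qc cv = true := by
        simp only [Bool.or_eq_true_iff, not_or] at h
        simp [Qc, bne, h.1, h.2]
      simp only [List.foldl_cons, h, if_neg, List.filter_cons, hq, if_pos]
      rw [ih]
      simp [rowF, Int.add_assoc, Int.add_comm, Int.add_left_comm]

-- A's first pass: totals
theorem A_pass : ∀ (value : List (String × List (String × Int))) (U T : Int),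
    value.foldl
      (fun (acc : Int × Int) cv =>
        if Qc cv then (acc.1 + uncovA cv.2, acc.2 + (cv.2.length : Int)) else acc) (U, T)
      = (U + ((value.filter Qc).map (fun cv => uncovA cv.2)).sum,
         T + ((value.filter Qc).map (fun cv => (cv.2.length : Int))).sum) := by
  intro value
  induction value with
  | nil => intro U T; simp
  | cons cv t ih =>
    intro U T
    by_cases h : Qc cv
    · simp only [List.foldl_cons, h, if_pos, List.filter_cons]
      rw [ih]
      simp [Int.add_assoc, Int.add_comm, Int.add_left_comm]
    · have hq : Qc cv = false := by simpa using h
      simp only [List.foldl_cons, hq, Bool.false_eq_true, if_neg, List.filter_cons]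
      exact ih U T

theorem sums_split (l : List (String × List (String × Int))) :
    (l.map (fun cv => (cv.2.length : Int))).sum
      = (l.map (fun cv => uncovA cv.2)).sum + (l.map (fun cv => covB cv.2)).sum := by
  induction l with
  | nil => simp
  | cons a t ih =>
    simp only [List.map_cons, List.sum_cons, ih]
    rw [← uncov_add_cov a.2]; ring

theorem lookup_of_mem {α : Type} : ∀ (value : List (String × α)),
    (value.map Prod.fst).Nodup → ∀ {cv : String × α}, cv ∈ value → ∀ (d : α),
    (PySem.Dict.mk value).getD cv.1 d = cv.2 := by
  intro value
  induction value with
  | nil => intro _ cv hm; exact absurd hm (List.not_mem_nil)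
  | cons p t ih =>
    intro hn cv hm d
    obtain ⟨k, v⟩ := p
    rw [PySem.Dict.getD_eq_get?_getD, PySem.Dict.get?_mk_cons]
    have hn0 : (k :: t.map Prod.fst).Nodup := by simpa only [List.map_cons] using hn
    have hn' := List.nodup_cons.mp hn0
    rcases List.mem_cons.mp hm with heq | hmt
    · subst heq; simp
    · have hkne : (k == cv.1) = false := by
        have hin : cv.1 ∈ t.map Prod.fst := List.mem_map_of_mem hmt
        simp only [beq_eq_false_iff_ne, ne_eq]
        intro he; exact hn'.1 (he ▸ hin)
      simp only [hkne, Bool.false_eq_true, if_false]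
      rw [← PySem.Dict.getD_eq_get?_getD]
      exact ih hn'.2 hmt d

theorem cat_eq (detailed : Bool) (cv : String × List (String × Int)) :
    catA detailed cv = SJ (rowLines detailed (rowF cv)) := by
  have hc : (cv.2.length : Int) - uncovA cv.2 = covB cv.2 := by
    have := uncov_add_cov cv.2; omega
  have t1 : (":\n" : String).toList = (":" : String).toList ++ ("\n" : String).toList := by decide
  have t2 : ("    detail:\n" : String).toList
      = ("    detail:" : String).toList ++ ("\n" : String).toList := by decide
  unfold catA rowLines rowF SJ
  cases detailed <;>
  · apply str_ext
    simp [toList_join, hc, t1, t2, List.map_map, Function.comp_def]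

theorem SJ_flatMap {α : Type} (f : α → List String) : ∀ (l : List α),
    SJ (l.flatMap f) = String.join (l.map (fun x => SJ (f x))) := by
  intro l
  induction l with
  | nil => rfl
  | cons a t ih => simp only [List.flatMap_cons, SJ_append, List.map_cons, join_cons, ih]

-- A's per-label contribution as one string
def SAstr (detailed : Bool) (lv : String × List (String × List (String × Int))) : String :=
  lv.1 ++ ":\n" ++ "  coverage: " ++
    PySem.Int.toStr (((lv.2.filter Qc).map (fun cv => (cv.2.length : Int))).sum
                      - ((lv.2.filter Qc).map (fun cv => uncovA cv.2)).sum) ++ "/" ++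
    PySem.Int.toStr (((lv.2.filter Qc).map (fun cv => (cv.2.length : Int))).sum) ++ "\n" ++
  String.join ((lv.2.filter Qc).map (catA detailed))

-- B's per-label contribution as lines
def labLines (detailed : Bool) (lv : String × List (String × List (String × Int))) : List String :=
  (lv.1 ++ ":") ::
  ("  coverage: " ++ PySem.Int.toStr (((lv.2.filter Qc).map (fun cv => covB cv.2)).sum) ++ "/"
      ++ PySem.Int.toStr (((lv.2.filter Qc).map (fun cv => (cv.2.length : Int))).sum)) ::
  (((lv.2.filter Qc).map rowF).flatMap (rowLines detailed))

theorem SJ_cons (a : String) (t : List String) : SJ (a :: t) = (a ++ "\n") ++ SJ t := by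
  simp [SJ, join_cons]

theorem lab_eq (detailed : Bool) (lv : String × List (String × List (String × Int))) :
    SAstr detailed lv = SJ (labLines detailed lv) := by
  have hsum : ((lv.2.filter Qc).map (fun cv => (cv.2.length : Int))).sum
      - ((lv.2.filter Qc).map (fun cv => uncovA cv.2)).sum
      = ((lv.2.filter Qc).map (fun cv => covB cv.2)).sum := by
    have := sums_split (lv.2.filter Qc); omega
  have t1 : (":\n" : String).toList = (":" : String).toList ++ ("\n" : String).toList := by decide
  unfold SAstr labLines
  rw [hsum]
  have hrows : SJ ((((lv.2.filter Qc).map rowF).flatMap (rowLines detailed)))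
      = String.join ((lv.2.filter Qc).map (catA detailed)) := by
    rw [SJ_flatMap]
    simp only [List.map_map]
    apply congrArg
    apply List.map_congr_left
    intro cv _
    exact (cat_eq detailed cv).symm
  rw [SJ_cons, SJ_cons, hrows]
  apply str_ext
  simp [t1]

-- the two fold steps, definitionally equal to the ports' loop bodies
def Astep (detailed : Bool) (rpt_str : String) (lv : String × List (String × List (String × Int))) : String :=
  if lv.1 != "datasets" then
    let value := lv.2
    let r1 := rpt_str ++ lv.1 ++ ":\n"
    let tp : Int × Int := (value.map Prod.fst).foldl (fun acc k =>
        if k != "config" && k != "opcode" then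
          let cps := (PySem.Dict.mk value).getD k []
          (acc.1 + uncovA cps, acc.2 + (cps.length : Int))
        else acc) (0, 0)
    let r2 := r1 ++ "  coverage: " ++ PySem.Int.toStr (tp.2 - tp.1) ++ "/" ++ PySem.Int.toStr tp.2 ++ "\n"
    (value.map Prod.fst).foldl (fun r k =>
      if k != "config" && k != "opcode" then
        let cps := (PySem.Dict.mk value).getD k []
        let uncovered := uncovA cps
        let node := "  " ++ k ++ ":\n" ++ "    coverage: " ++
                    PySem.Int.toStr ((cps.length : Int) - uncovered) ++ "/" ++
                    PySem.Int.toStr ((cps.length : Int))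
        let r' := r ++ node ++ "\n"
        if detailed then
          (cps.map Prod.fst).foldl
            (fun r'' ck => r'' ++ "      - " ++ ck ++ ": " ++
                           PySem.Int.toStr ((PySem.Dict.mk cps).getD ck 0) ++ "\n")
            (r' ++ "    detail:\n")
        else r'
      else r) r2
  else rpt_str

def Bstep (detailed : Bool) (lines : List String) (lv : String × List (String × List (String × Int))) : List String :=
  if lv.1 == "datasets" then lines else
  let lines := lines ++ [lv.1 ++ ":"]
  let rt := lv.2.foldl
    (fun (acc : List (String × Int × Int × List (String × Int)) × Int × Int) cv =>
      if cv.1 == "config" || cv.1 == "opcode" then acc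
      else
        let n : Int := (cv.2.length : Int)
        let covered := covB cv.2
        (acc.1 ++ [(cv.1, covered, n, cv.2)], acc.2.1 + covered, acc.2.2 + n))
    ([], 0, 0)
  let lines := lines ++ ["  coverage: " ++ PySem.Int.toStr rt.2.1 ++ "/" ++ PySem.Int.toStr rt.2.2]
  rt.1.foldl (fun ls row =>
    let ls := ls ++ ["  " ++ row.1 ++ ":"] ++
              ["    coverage: " ++ PySem.Int.toStr row.2.1 ++ "/" ++ PySem.Int.toStr row.2.2.1]
    if detailed then
      ls ++ ["    detail:"] ++
        row.2.2.2.map (fun kv => "      - " ++ kv.1 ++ ": " ++ PySem.Int.toStr kv.2)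
    else ls) lines

def Blines (cgf : List (String × List (String × List (String × Int)))) (detailed : Bool) : List String :=
  cgf.foldl (Bstep detailed) []

theorem gen_report_def (cgf : List (String × List (String × List (String × Int)))) (detailed : Bool) :
    gen_report cgf detailed = cgf.foldl (Astep detailed) "" := rfl

theorem gen_report_alt_def (cgf : List (String × List (String × List (String × Int)))) (detailed : Bool) :
    gen_report_alt cgf detailed =
      (if (Blines cgf detailed).isEmpty then "" else PySem.Str.join "\n" (Blines cgf detailed) ++ "\n") := rfl

theorem B_label (detailed : Bool) (lv : String × List (String × List (String × Int))) (ls : List String) :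
    Bstep detailed ls lv = if lv.1 == "datasets" then ls else ls ++ labLines detailed lv := by
  by_cases hds : lv.1 = "datasets"
  · simp [Bstep, hds]
  · have h2 : (lv.1 == "datasets") = false := by simpa using hds
    simp only [Bstep, h2, Bool.false_eq_true, if_false]
    rw [B_pass detailed]
    have hstep : ∀ (ls0 : List String) (row : String × Int × Int × List (String × Int)),
        (let ls1 := ls0 ++ ["  " ++ row.1 ++ ":"] ++
              ["    coverage: " ++ PySem.Int.toStr row.2.1 ++ "/" ++ PySem.Int.toStr row.2.2.1]
         if detailed then
           ls1 ++ ["    detail:"] ++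
             row.2.2.2.map (fun kv => "      - " ++ kv.1 ++ ": " ++ PySem.Int.toStr kv.2)
         else ls1) = ls0 ++ rowLines detailed row := by
      intro ls0 row
      cases detailed <;> simp [rowLines, dline]
    rw [PySem.List.foldl_congr_mem (g := fun ls0 row => ls0 ++ rowLines detailed row)
        (h := fun acc x _ => hstep acc x)]
    rw [PySem.List.foldl_append_eq_flatMap]
    simp [labLines]

theorem A_label (detailed : Bool) (lv : String × List (String × List (String × Int)))
    (hp : lv.1 ≠ "datasets" → ((lv.2.map Prod.fst).Nodup ∧
      ∀ cv ∈ lv.2, Qc cv = true → (cv.2.map Prod.fst).Nodup)) (r : String) :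
    Astep detailed r lv = if lv.1 == "datasets" then r else r ++ SAstr detailed lv := by
  by_cases hds : lv.1 = "datasets"
  · simp [Astep, hds]
  · have h1 : (lv.1 != "datasets") = true := by simpa using hds
    have h2 : (lv.1 == "datasets") = false := by simpa using hds
    obtain ⟨hnd, hcv⟩ := hp hds
    simp only [Astep, h1, h2, Bool.false_eq_true, eq_self_iff_true, if_true, if_false]
    rw [List.foldl_map, List.foldl_map]
    -- totals fold: replace the dict lookups by the entries themselves
    rw [PySem.List.foldl_congr_mem
          (g := fun (acc : Int × Int) cv =>
            if Qc cv then (acc.1 + uncovA cv.2, acc.2 + (cv.2.length : Int)) else acc)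
          (h := by
            intro acc cv hm
            simp only [Qc]
            split
            · rw [lookup_of_mem lv.2 hnd hm]
            · rfl)]
    rw [A_pass]
    -- second pass: replace each step by appending a per-category string
    rw [PySem.List.foldl_congr_mem
          (g := fun (racc : String) cv => racc ++ (if Qc cv then catA detailed cv else ""))
          (h := by
            intro acc cv hm
            simp only [Qc]
            split
            · rename_i hq
              rw [lookup_of_mem lv.2 hnd hm]
              have hnd2 : (cv.2.map Prod.fst).Nodup := hcv cv hm (by simpa [Qc] using hq)
              rw [List.foldl_map]
              cases hdet : detailed
              · simp only [Bool.false_eq_true, if_false]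
                apply str_ext; simp [catA]
              · simp only [eq_self_iff_true, if_true]
                rw [PySem.List.foldl_congr_mem
                      (g := fun (r'' : String) kv => r'' ++ (dline kv ++ "\n"))
                      (h := by
                        intro acc2 kv hm2
                        rw [lookup_of_mem cv.2 hnd2 hm2]
                        apply str_ext; simp [dline])]
                rw [foldl_strcat]
                apply str_ext; simp [catA, dline, toList_join, List.map_map, Function.comp_def]
            · apply str_ext; simp)]
    rw [foldl_strcat, join_ite]
    apply str_ext
    simp [SAstr]

theorem main_fold (detailed : Bool) : ∀ (cgf : List (String × List (String × List (String × Int)))),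
    (∀ lv ∈ cgf, lv.1 ≠ "datasets" →
      (lv.2.map Prod.fst).Nodup ∧
      ∀ cv ∈ lv.2, cv.1 ≠ "config" → cv.1 ≠ "opcode" →
        cv.2 ≠ [] ∧ (cv.2.map Prod.fst).Nodup) →
    ∀ (r : String) (ls : List String), r = SJ ls →
    cgf.foldl (Astep detailed) r = SJ (cgf.foldl (Bstep detailed) ls) := by
  intro cgf
  induction cgf with
  | nil => intro _ r ls h; simpa using h
  | cons lv t ih =>
    intro hp r ls hinv
    simp only [List.foldl_cons]
    have hhead := hp lv (by simp)
    have hA : lv.1 ≠ "datasets" → ((lv.2.map Prod.fst).Nodup ∧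
        ∀ cv ∈ lv.2, Qc cv = true → (cv.2.map Prod.fst).Nodup) := by
      intro hne
      refine ⟨(hhead hne).1, ?_⟩
      intro cv hm hq
      simp only [Qc, Bool.and_eq_true, bne_iff_ne] at hq
      exact ((hhead hne).2 cv hm hq.1 hq.2).2
    rw [A_label detailed lv hA r, B_label detailed lv ls]
    by_cases hds : lv.1 = "datasets"
    · have h2 : (lv.1 == "datasets") = true := by simpa using hds
      simp only [h2, eq_self_iff_true, if_true]
      exact ih (fun lv' hm => hp lv' (by simp [hm])) r ls hinv
    · have h2 : (lv.1 == "datasets") = false := by simpa using hds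
      simp only [h2, Bool.false_eq_true, if_false]
      apply ih (fun lv' hm => hp lv' (by simp [hm]))
      rw [SJ_append, hinv, lab_eq]

-- ===== VERDICT (by name: the statement is the Claim_ definition above) =====
theorem gen_report_spec : Claim_equal_gen_report := by
  intro cgf detailed _ hpre
  unfold Spec_gen_report
  have h1 : gen_report cgf detailed = SJ (Blines cgf detailed) := by
    rw [gen_report_def]
    exact main_fold detailed cgf hpre.2 "" [] rfl
  rw [h1, gen_report_alt_def]
  cases hbl : Blines cgf detailed with
  | nil => simp [SJ_nil]
  | cons a tl =>
    have hne : ((a :: tl : List String).isEmpty) = false := rfl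
    simp only [hne, Bool.false_eq_true, if_false]
    exact (join_newline _ (by simp)).symm
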